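-- pv_equiv track=rewrite | github.com/baranskixx/agh-ust-algorithms-and-data-structures | 20-21/kol2/zad3.py | modify_board
-- ===== SOURCE A (Python) =====
-- def modify_board(T):
--     h = len(T)
--     w = len(T[0])
--     V = [[False]*w for _ in range(h)]
--
--     def dfs(y, x):
--         if y < 0 or x < 0 or y >= h or x >= w or V[y][x] or T[y][x] == 0:
--             return 0
--         V[y][x] = True
--         tmp = T[y][x]
--         T[y][x] = 0
--
--         return tmp + dfs(y-1, x) + dfs(y+1, x) + dfs(y, x-1) + dfs(y, x+1)
--
--     for x in range(w):
--         if T[0][x] != 0: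
--             T[0][x] = dfs(0, x)
--
--     return T
-- ===== SOURCE B (Python) =====
-- # Iterative explicit-stack flood fill instead of A's recursive DFS; same in-place mutation of T.
-- def modify_board(T):
--     h = len(T)
--     w = len(T[0])
--     V = [[False] * w for _ in range(h)]
--
--     for x0 in range(w):
--         if T[0][x0] != 0:
--             total = 0
--             stack = [(0, x0)]
--             while stack:
--                 y, x = stack.pop()
--                 if y < 0 or x < 0 or y >= h or x >= w or V[y][x] or T[y][x] == 0:
--                     continue
--                 V[y][x] = True
--                 total += T[y][x]
--                 T[y][x] = 0
--                 stack.extend([(y, x + 1), (y, x - 1), (y + 1, x), (y - 1, x)])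
--             T[0][x0] = total
--
--     return T
-- ===== Notes on version B (the rewrite author's own statement) =====
-- stated objective: idiomatic
-- what changed: A's recursive DFS (per-cell Python function calls, recursion-depth bound) is replaced by an iterative flood fill over an explicit stack list, popping cells in a while loop; same in-place mutation of T.
-- outside the precondition, e.g. on modify_board([]): A raises IndexError, B raises IndexError; on modify_board([[1, 0], [0]]): A returns [[1, 0], [0]], B returns [[1, 0], [0]]
import Mathlib
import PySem

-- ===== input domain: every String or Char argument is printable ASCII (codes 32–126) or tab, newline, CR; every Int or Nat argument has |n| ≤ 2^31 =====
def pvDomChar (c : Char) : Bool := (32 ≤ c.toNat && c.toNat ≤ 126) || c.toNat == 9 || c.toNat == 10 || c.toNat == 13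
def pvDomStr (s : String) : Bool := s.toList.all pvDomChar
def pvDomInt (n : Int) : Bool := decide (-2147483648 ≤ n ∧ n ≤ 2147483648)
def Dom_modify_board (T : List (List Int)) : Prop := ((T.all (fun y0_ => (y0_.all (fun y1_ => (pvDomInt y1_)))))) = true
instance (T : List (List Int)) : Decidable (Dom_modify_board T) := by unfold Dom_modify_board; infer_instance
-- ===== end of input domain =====

-- B replaces A's recursive DFS by an iterative explicit-stack flood fill (same in-place
-- mutation of T; the equivalence proved is about the returned value).

-- ===== PORT A =====
-- shared 2-d accessors; exact for the in-range accesses both Pythons perform under Pre_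
def pvIGet (T : List (List Int)) (y x : Nat) : Int := (T.getD y []).getD x 0
def pvBGet (V : List (List Bool)) (y x : Nat) : Bool := (V.getD y []).getD x false
def pvISet (T : List (List Int)) (y x : Nat) (v : Int) : List (List Int) :=
  T.set y ((T.getD y []).set x v)
def pvBSet (V : List (List Bool)) (y x : Nat) (b : Bool) : List (List Bool) :=
  V.set y ((V.getD y []).set x b)
-- the guard line shared verbatim by A's dfs and B's loop
def pvInvalid (h w : Nat) (y x : Int) (T : List (List Int)) (V : List (List Bool)) : Bool :=
  decide (y < 0) || decide (x < 0) || decide ((h : Int) ≤ y) || decide ((w : Int) ≤ x) ||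
    pvBGet V y.toNat x.toNat || decide (pvIGet T y.toNat x.toNat = 0)

-- A's recursive dfs; fuel only makes the same recursion total (h*w+1 is always enough)
def pvDfs (h w : Nat) : Nat → Int → Int → List (List Int) → List (List Bool) →
    Int × List (List Int) × List (List Bool)
  | 0, _, _, T, V => (0, T, V)
  | f + 1, y, x, T, V =>
    if pvInvalid h w y x T V then (0, T, V)
    else
      let tmp := pvIGet T y.toNat x.toNat
      let T1 := pvISet T y.toNat x.toNat 0
      let V1 := pvBSet V y.toNat x.toNat true
      let r1 := pvDfs h w f (y - 1) x T1 V1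
      let r2 := pvDfs h w f (y + 1) x r1.2.1 r1.2.2
      let r3 := pvDfs h w f y (x - 1) r2.2.1 r2.2.2
      let r4 := pvDfs h w f y (x + 1) r3.2.1 r3.2.2
      (tmp + r1.1 + r2.1 + r3.1 + r4.1, r4.2.1, r4.2.2)

def pvStepA (h w : Nat) (st : List (List Int) × List (List Bool)) (x : Nat) :
    List (List Int) × List (List Bool) :=
  if pvIGet st.1 0 x ≠ 0 then
    let r := pvDfs h w (h * w + 1) 0 (x : Int) st.1 st.2
    (pvISet r.2.1 0 x r.1, r.2.2)
  else st

def modify_board (T : List (List Int)) : List (List Int) :=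
  let h := T.length
  let w := (T.headD []).length
  let V0 : List (List Bool) := List.replicate h (List.replicate w false)
  ((List.range w).foldl (pvStepA h w) (T, V0)).1

-- ===== PORT B =====
-- B's while loop over the explicit stack; fuel only makes it total (5*h*w+2 is always enough)
def pvFlood (h w : Nat) : Nat → List (Int × Int) → Int → List (List Int) → List (List Bool) →
    Int × List (List Int) × List (List Bool)
  | _, [], acc, T, V => (acc, T, V)
  | 0, _ :: _, acc, T, V => (acc, T, V)
  | g + 1, (y, x) :: rest, acc, T, V =>
    if pvInvalid h w y x T V then pvFlood h w g rest acc T V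
    else
      pvFlood h w g ((y - 1, x) :: (y + 1, x) :: (y, x - 1) :: (y, x + 1) :: rest)
        (acc + pvIGet T y.toNat x.toNat)
        (pvISet T y.toNat x.toNat 0) (pvBSet V y.toNat x.toNat true)

def pvStepB (h w : Nat) (st : List (List Int) × List (List Bool)) (x : Nat) :
    List (List Int) × List (List Bool) :=
  if pvIGet st.1 0 x ≠ 0 then
    let r := pvFlood h w (5 * (h * w) + 2) [((0 : Int), (x : Int))] 0 st.1 st.2
    (pvISet r.2.1 0 x r.1, r.2.2)
  else st

def modify_board_alt (T : List (List Int)) : List (List Int) :=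
  let h := T.length
  let w := (T.headD []).length
  let V0 : List (List Bool) := List.replicate h (List.replicate w false)
  ((List.range w).foldl (pvStepB h w) (T, V0)).1

-- ===== PRECONDITION & SPEC =====
-- Pre_ excludes the empty board (A raises IndexError at T[0]) and boards with a row shorter
-- than the first row, on which A raises IndexError whenever the flood reaches a missing cell
-- (on shielded ragged boards A still returns; both programs behave alike there).
def Pre_modify_board (T : List (List Int)) : Prop :=
  T ≠ [] ∧ ∀ r ∈ T, (T.headD []).length ≤ r.length
instance (T : List (List Int)) : Decidable (Pre_modify_board T) := by
  unfold Pre_modify_board; infer_instance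
def pvWitness_modify_board : List (List Int) := [[1, 2], [3, 4]]

def Spec_modify_board (T : List (List Int)) (out : List (List Int)) : Prop := out = modify_board_alt T
instance (T : List (List Int)) (out : List (List Int)) : Decidable (Spec_modify_board T out) := by unfold Spec_modify_board; infer_instance

-- ===== CLAIM (what is proved, stated in full; the proofs are below) =====
def Claim_equal_modify_board : Prop := ∀ (T : List (List Int)), Dom_modify_board T → Pre_modify_board T → Spec_modify_board T (modify_board T)

-- ===== LEMMAS AND PROOFS =====

-- number of unvisited cells: the termination measure both fuels dominate
def pvUnvis (V : List (List Bool)) : Nat := (V.map (fun r => r.count false)).sum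
def pvDims (h w : Nat) (V : List (List Bool)) : Prop :=
  V.length = h ∧ ∀ r ∈ V, r.length = w

theorem pv_count_set_true_le (r : List Bool) : ∀ x, ((r.set x true).count false) ≤ r.count false := by
  induction r with
  | nil => intro x; simp
  | cons b t ih =>
    intro x
    cases x with
    | zero => cases b <;> simp [List.count_cons] <;> omega
    | succ x => simp [List.count_cons]; have := ih x; omega

theorem pv_count_set_true (r : List Bool) : ∀ x, x < r.length → r.getD x false = false →
    (r.set x true).count false + 1 = r.count false := by
  induction r with
  | nil => intro x hx; simp at hx
  | cons b t ih =>
    intro x hx hb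
    cases x with
    | zero => simp at hb; subst hb; simp [List.count_cons]
    | succ x =>
      simp at hx hb
      have hb' : t.getD x false = false := by simpa [List.getD] using hb
      simp [List.count_cons]
      have := ih x hx hb'
      omega

theorem pv_unvis_set_le (V : List (List Bool)) : ∀ y x, pvUnvis (pvBSet V y x true) ≤ pvUnvis V := by
  induction V with
  | nil => intro y x; simp [pvBSet, pvUnvis]
  | cons r t ih =>
    intro y x
    cases y with
    | zero =>
      simp [pvBSet, pvUnvis, List.getD_cons_zero]
      have := pv_count_set_true_le r x
      omega
    | succ y =>
      have h1 : pvBSet (r :: t) (y + 1) x true = r :: pvBSet t y x true := by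
        simp [pvBSet, List.getD_cons_succ]
      rw [h1]
      simp [pvUnvis] at ih ⊢
      have := ih y x
      omega

theorem pv_unvis_set_flip (V : List (List Bool)) : ∀ y x, y < V.length →
    x < (V.getD y []).length → pvBGet V y x = false →
    pvUnvis (pvBSet V y x true) + 1 = pvUnvis V := by
  induction V with
  | nil => intro y x hy; simp at hy
  | cons r t ih =>
    intro y x hy hx hb
    cases y with
    | zero =>
      simp [List.getD_cons_zero] at hx hb
      simp [pvBSet, pvUnvis, List.getD_cons_zero]
      have := pv_count_set_true r x hx hb
      omega
    | succ y =>
      simp [List.getD_cons_succ] at hx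
      simp at hy
      have hb' : pvBGet t y x = false := by simpa [pvBGet, List.getD_cons_succ] using hb
      have h1 : pvBSet (r :: t) (y + 1) x true = r :: pvBSet t y x true := by
        simp [pvBSet, List.getD_cons_succ]
      rw [h1]
      simp [pvUnvis] at ih ⊢
      have := ih y x hy hx hb'
      omega

theorem pv_dims_set (h w : Nat) (V : List (List Bool)) (y x : Nat) (hD : pvDims h w V) :
    pvDims h w (pvBSet V y x true) := by
  obtain ⟨hl, hr⟩ := hD
  by_cases hy : y < V.length
  · refine ⟨by simp [pvBSet, hl], ?_⟩
    intro r hrm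
    rcases List.mem_or_eq_of_mem_set hrm with hm | he
    · exact hr r hm
    · subst he
      have hmem : V.getD y [] ∈ V := by
        rw [List.getD_eq_getElem V [] hy]; exact List.getElem_mem hy
      rw [List.length_set]; exact hr _ hmem
  · have : pvBSet V y x true = V := by
      simp [pvBSet]; exact List.set_eq_of_length_le (by omega)
    rw [this]; exact ⟨hl, hr⟩

theorem pv_unvis_le_aux (w : Nat) : ∀ V : List (List Bool), (∀ r ∈ V, r.length = w) →
    pvUnvis V ≤ V.length * w := by
  intro V
  induction V with
  | nil => intro _; simp [pvUnvis]
  | cons r t ih =>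
    intro hr
    have h1 : r.count false ≤ w := by
      have hcl := List.count_le_length (l := r) (a := false)
      have := hr r (by simp)
      omega
    have h2 := ih (fun r hm => hr r (by simp [hm]))
    simp [pvUnvis] at h2 ⊢
    have h3 : (t.length + 1) * w = t.length * w + w := by ring
    omega

theorem pv_unvis_le (h w : Nat) (V : List (List Bool)) (hD : pvDims h w V) :
    pvUnvis V ≤ h * w := by
  obtain ⟨hl, hr⟩ := hD
  have := pv_unvis_le_aux w V hr
  rw [← hl]; exact this
  

-- decompose a failing guard
theorem pv_invalid_false (h w : Nat) (y x : Int) (T : List (List Int)) (V : List (List Bool))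
    (hc : pvInvalid h w y x T V = false) :
    0 ≤ y ∧ 0 ≤ x ∧ y < (h : Int) ∧ x < (w : Int) ∧ pvBGet V y.toNat x.toNat = false ∧
      pvIGet T y.toNat x.toNat ≠ 0 := by
  simp [pvInvalid] at hc
  exact ⟨by omega, by omega, by omega, by omega, by tauto, by tauto⟩

theorem pv_flip_of_valid (h w : Nat) (y x : Int) (T : List (List Int)) (V : List (List Bool))
    (hD : pvDims h w V) (hc : pvInvalid h w y x T V = false) :
    pvUnvis (pvBSet V y.toNat x.toNat true) + 1 = pvUnvis V := by
  obtain ⟨hy0, hx0, hyh, hxw, hb, _⟩ := pv_invalid_false h w y x T V hc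
  obtain ⟨hl, hr⟩ := hD
  have hy : y.toNat < V.length := by omega
  have hrow : V.getD y.toNat [] ∈ V := by
    rw [List.getD_eq_getElem V [] hy]; exact List.getElem_mem hy
  have hx : x.toNat < (V.getD y.toNat []).length := by
    rw [hr _ hrow]; omega
  exact pv_unvis_set_flip V y.toNat x.toNat hy hx hb

-- the two unfolding equations for pvDfs below fuel f+1
theorem pvDfs_invalid (h w f : Nat) (y x : Int) (T : List (List Int)) (V : List (List Bool))
    (hc : pvInvalid h w y x T V = true) : pvDfs h w (f + 1) y x T V = (0, T, V) := by
  simp [pvDfs, hc]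

theorem pvDfs_valid (h w f : Nat) (y x : Int) (T : List (List Int)) (V : List (List Bool))
    (hc : pvInvalid h w y x T V = false) :
    pvDfs h w (f + 1) y x T V =
      (let r1 := pvDfs h w f (y - 1) x (pvISet T y.toNat x.toNat 0) (pvBSet V y.toNat x.toNat true)
       let r2 := pvDfs h w f (y + 1) x r1.2.1 r1.2.2
       let r3 := pvDfs h w f y (x - 1) r2.2.1 r2.2.2
       let r4 := pvDfs h w f y (x + 1) r3.2.1 r3.2.2
       (pvIGet T y.toNat x.toNat + r1.1 + r2.1 + r3.1 + r4.1, r4.2.1, r4.2.2)) := by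
  simp [pvDfs, hc]

-- dfs preserves dims and never increases the number of unvisited cells
theorem pvDfs_inv (h w : Nat) : ∀ f y x T V, pvDims h w V →
    pvDims h w (pvDfs h w f y x T V).2.2 ∧ pvUnvis (pvDfs h w f y x T V).2.2 ≤ pvUnvis V := by
  intro f
  induction f with
  | zero => intro y x T V hD; exact ⟨hD, le_refl _⟩
  | succ f ih =>
    intro y x T V hD
    by_cases hc : pvInvalid h w y x T V = true
    · rw [pvDfs_invalid h w f y x T V hc]; exact ⟨hD, le_refl _⟩
    · have hc' : pvInvalid h w y x T V = false := by simpa using hc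
      rw [pvDfs_valid h w f y x T V hc']
      dsimp only
      have hD1 := pv_dims_set h w V y.toNat x.toNat hD
      have hu1 := pv_unvis_set_le V y.toNat x.toNat
      obtain ⟨d1, u1⟩ := ih (y - 1) x (pvISet T y.toNat x.toNat 0) (pvBSet V y.toNat x.toNat true) hD1
      obtain ⟨d2, u2⟩ := ih (y + 1) x _ _ d1
      obtain ⟨d3, u3⟩ := ih y (x - 1) _ _ d2
      obtain ⟨d4, u4⟩ := ih y (x + 1) _ _ d3
      exact ⟨d4, by omega⟩

-- the flood loop is fuel-insensitive once fuel exceeds 5*unvisited + stack length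
theorem pvFlood_fuel (h w : Nat) : ∀ g g' s acc T V, pvDims h w V →
    5 * pvUnvis V + s.length < g → 5 * pvUnvis V + s.length < g' →
    pvFlood h w g s acc T V = pvFlood h w g' s acc T V := by
  intro g
  induction g with
  | zero => intro g' s acc T V _ hg _; omega
  | succ g ih =>
    intro g' s acc T V hD hg hg'
    match s with
    | [] => cases g' with
      | zero => simp at hg'
      | succ g' => simp [pvFlood]
    | (y, x) :: rest =>
      obtain ⟨g', rfl⟩ : ∃ k, g' = k + 1 := ⟨g' - 1, by omega⟩
      by_cases hc : pvInvalid h w y x T V = true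
      · simp only [pvFlood, hc, if_true]
        exact ih g' rest acc T V hD (by simp only [List.length_cons] at hg; omega)
          (by simp only [List.length_cons] at hg'; omega)
      · have hc' : pvInvalid h w y x T V = false := by simpa using hc
        have hflip := pv_flip_of_valid h w y x T V hD hc'
        have hD1 := pv_dims_set h w V y.toNat x.toNat hD
        simp only [pvFlood, hc', Bool.false_eq_true, if_false]
        exact ih g' _ _ _ _ hD1 (by simp only [List.length_cons] at hg ⊢; omega)
          (by simp only [List.length_cons] at hg' ⊢; omega)

-- the bridge: popping one cell from the stack performs exactly A's dfs from that cell
theorem pvBridge (h w : Nat) : ∀ n y x rest acc T V f g, pvDims h w V → pvUnvis V ≤ n →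
    n < f → 5 * n + rest.length + 1 < g →
    pvFlood h w g ((y, x) :: rest) acc T V =
      pvFlood h w g rest (acc + (pvDfs h w f y x T V).1)
        (pvDfs h w f y x T V).2.1 (pvDfs h w f y x T V).2.2 := by
  intro n
  induction n with
  | zero =>
    intro y x rest acc T V f g hD hu hf hg
    obtain ⟨f, rfl⟩ : ∃ k, f = k + 1 := ⟨f - 1, by omega⟩
    obtain ⟨g, rfl⟩ : ∃ k, g = k + 1 := ⟨g - 1, by omega⟩
    by_cases hc : pvInvalid h w y x T V = true
    · rw [pvDfs_invalid h w f y x T V hc]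
      simp only [pvFlood, hc, if_true]
      rw [add_zero]
      exact pvFlood_fuel h w g (g + 1) rest acc T V hD (by omega) (by omega)
    · have hc' : pvInvalid h w y x T V = false := by simpa using hc
      have := pv_flip_of_valid h w y x T V hD hc'
      omega
  | succ n ih =>
    intro y x rest acc T V f g hD hu hf hg
    obtain ⟨f, rfl⟩ : ∃ k, f = k + 1 := ⟨f - 1, by omega⟩
    obtain ⟨g, rfl⟩ : ∃ k, g = k + 1 := ⟨g - 1, by omega⟩
    by_cases hc : pvInvalid h w y x T V = true
    · rw [pvDfs_invalid h w f y x T V hc]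
      simp only [pvFlood, hc, if_true]
      rw [add_zero]
      exact pvFlood_fuel h w g (g + 1) rest acc T V hD (by omega) (by omega)
    · have hc' : pvInvalid h w y x T V = false := by simpa using hc
      have hflip := pv_flip_of_valid h w y x T V hD hc'
      have hD1 := pv_dims_set h w V y.toNat x.toNat hD
      have hu1 : pvUnvis (pvBSet V y.toNat x.toNat true) ≤ n := by omega
      rw [pvDfs_valid h w f y x T V hc']
      dsimp only
      simp only [pvFlood, hc', Bool.false_eq_true, if_false]
      set v := pvIGet T y.toNat x.toNat with hv
      set T1 := pvISet T y.toNat x.toNat 0 with hT1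
      set V1 := pvBSet V y.toNat x.toNat true with hV1
      rw [ih (y - 1) x ((y + 1, x) :: (y, x - 1) :: (y, x + 1) :: rest) (acc + v) T1 V1 f g
        hD1 hu1 (by omega) (by simp only [List.length_cons]; omega)]
      obtain ⟨d1, u1⟩ := pvDfs_inv h w f (y - 1) x T1 V1 hD1
      set r1 := pvDfs h w f (y - 1) x T1 V1 with hr1
      rw [ih (y + 1) x ((y, x - 1) :: (y, x + 1) :: rest) (acc + v + r1.1) r1.2.1 r1.2.2 f g
        d1 (by omega) (by omega) (by simp only [List.length_cons]; omega)]
      obtain ⟨d2, u2⟩ := pvDfs_inv h w f (y + 1) x r1.2.1 r1.2.2 d1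
      set r2 := pvDfs h w f (y + 1) x r1.2.1 r1.2.2 with hr2
      rw [ih y (x - 1) ((y, x + 1) :: rest) (acc + v + r1.1 + r2.1) r2.2.1 r2.2.2 f g
        d2 (by omega) (by omega) (by simp only [List.length_cons]; omega)]
      obtain ⟨d3, u3⟩ := pvDfs_inv h w f y (x - 1) r2.2.1 r2.2.2 d2
      set r3 := pvDfs h w f y (x - 1) r2.2.1 r2.2.2 with hr3
      rw [ih y (x + 1) rest (acc + v + r1.1 + r2.1 + r3.1) r3.2.1 r3.2.2 f g
        d3 (by omega) (by omega) (by omega)]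
      obtain ⟨d4, u4⟩ := pvDfs_inv h w f y (x + 1) r3.2.1 r3.2.2 d3
      set r4 := pvDfs h w f y (x + 1) r3.2.1 r3.2.2 with hr4
      have hacc : acc + v + r1.1 + r2.1 + r3.1 + r4.1 =
          acc + (v + r1.1 + r2.1 + r3.1 + r4.1) := by ring
      rw [hacc]
      exact pvFlood_fuel h w g (g + 1) rest (acc + (v + r1.1 + r2.1 + r3.1 + r4.1))
        r4.2.1 r4.2.2 d4 (by omega) (by omega)

-- one top-row step: the two loop bodies agree and preserve dims
theorem pvStep_eq (h w : Nat) (st : List (List Int) × List (List Bool)) (x : Nat)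
    (hD : pvDims h w st.2) :
    pvStepA h w st x = pvStepB h w st x ∧ pvDims h w (pvStepA h w st x).2 := by
  by_cases hcond : pvIGet st.1 0 x ≠ 0
  · have hu := pv_unvis_le h w st.2 hD
    have hb : pvFlood h w (5 * (h * w) + 2) [((0 : Int), (x : Int))] 0 st.1 st.2 =
        pvFlood h w (5 * (h * w) + 2) [] (0 + (pvDfs h w (h * w + 1) 0 (x : Int) st.1 st.2).1)
          (pvDfs h w (h * w + 1) 0 (x : Int) st.1 st.2).2.1
          (pvDfs h w (h * w + 1) 0 (x : Int) st.1 st.2).2.2 :=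
      pvBridge h w (h * w) 0 (x : Int) [] 0 st.1 st.2 (h * w + 1) (5 * (h * w) + 2) hD hu
        (by omega) (by simp)
    have hb2 : pvFlood h w (5 * (h * w) + 2) [((0 : Int), (x : Int))] 0 st.1 st.2 =
        ((pvDfs h w (h * w + 1) 0 (x : Int) st.1 st.2).1,
          (pvDfs h w (h * w + 1) 0 (x : Int) st.1 st.2).2.1,
          (pvDfs h w (h * w + 1) 0 (x : Int) st.1 st.2).2.2) := by
      rw [hb]; simp [pvFlood]
    constructor
    · simp only [pvStepA, pvStepB, if_pos hcond, hb2]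
    · simp only [pvStepA, if_pos hcond]
      exact (pvDfs_inv h w (h * w + 1) 0 (x : Int) st.1 st.2 hD).1
  · exact ⟨by simp only [pvStepA, pvStepB, if_neg hcond], by simp only [pvStepA, if_neg hcond]; exact hD⟩

theorem pvFold_eq (h w : Nat) : ∀ (xs : List Nat) (st : List (List Int) × List (List Bool)),
    pvDims h w st.2 → xs.foldl (pvStepA h w) st = xs.foldl (pvStepB h w) st := by
  intro xs
  induction xs with
  | nil => intro st _; rfl
  | cons x xs ih =>
    intro st hD
    obtain ⟨heq, hD'⟩ := pvStep_eq h w st x hD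
    simp only [List.foldl_cons]
    rw [← heq]
    exact ih (pvStepA h w st x) hD'

theorem pv_main (T : List (List Int)) : modify_board T = modify_board_alt T := by
  have hD : pvDims T.length (T.headD []).length
      (List.replicate T.length (List.replicate (T.headD []).length false)) := by
    constructor
    · simp
    · intro r hr
      rw [List.eq_of_mem_replicate hr]; simp
  have := pvFold_eq T.length (T.headD []).length (List.range (T.headD []).length)
    (T, List.replicate T.length (List.replicate (T.headD []).length false)) hD
  simp only [modify_board, modify_board_alt]
  rw [this]

-- ===== VERDICT (by name: the statement is the Claim_ definition above) =====
theorem modify_board_spec : Claim_equal_modify_board := by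
  intro T _ _
  unfold Spec_modify_board
  exact pv_main T
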